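-- pv_equiv track=rewrite | github.com/boostcampaitech3/final-project-level3-cv-06 | product_serving/app/ml/model_inference.py | count_trouble_type
-- ===== SOURCE A (Python) =====
-- def count_trouble_type(trouble_info):
--     troub = dict(type1=0, type2=0, type3=0)
--
--     for t in trouble_info:
--         if t['trouble_type'] == 1:
--             troub['type1'] += 1
--         elif t['trouble_type'] == 2:
--             troub['type2'] += 1
--         else:
--             troub['type3'] += 1
--
--     return troub
-- ===== SOURCE B (Python) =====
-- def count_trouble_type(trouble_info):
--     types = [t['trouble_type'] for t in trouble_info]
--     return {'type1': types.count(1), 'type2': types.count(2),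
--             'type3': len(types) - types.count(1) - types.count(2)}
-- ===== Notes on version B (the rewrite author's own statement) =====
-- stated objective: alternative
-- what changed: Replaces the single branching loop over a mutable three-key dict with staged passes: first materialise the list of trouble_type values, then count the 1s and 2s with list.count and derive type3 as the residual of the total.
import Mathlib
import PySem

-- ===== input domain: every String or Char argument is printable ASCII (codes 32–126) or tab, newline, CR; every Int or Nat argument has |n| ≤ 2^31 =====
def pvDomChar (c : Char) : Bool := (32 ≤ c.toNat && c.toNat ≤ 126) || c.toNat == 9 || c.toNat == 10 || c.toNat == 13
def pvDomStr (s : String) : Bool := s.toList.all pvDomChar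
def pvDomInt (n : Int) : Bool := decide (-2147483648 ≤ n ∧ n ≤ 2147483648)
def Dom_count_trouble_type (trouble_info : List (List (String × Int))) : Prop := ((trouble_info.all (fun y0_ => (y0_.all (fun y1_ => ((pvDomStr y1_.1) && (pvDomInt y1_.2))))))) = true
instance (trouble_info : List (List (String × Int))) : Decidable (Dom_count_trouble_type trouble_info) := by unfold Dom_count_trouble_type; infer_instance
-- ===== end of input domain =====

-- B restructures A's single branching loop into staged passes: extract the trouble_type values, count 1s and 2s with list.count, derive type3 as the residual (alternative decomposition, same cost).

-- t['trouble_type'] (Pre_ guarantees the key is present, so the default is never used)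
def pvTType (t : List (String × Int)) : Int := (PySem.Dict.mk t).getD "trouble_type" 0

-- ===== PORT A =====
def count_trouble_type (trouble_info : List (List (String × Int))) : List (String × Int) :=
  let troub : PySem.Dict String Int :=
    ((PySem.Dict.empty.insert "type1" 0).insert "type2" 0).insert "type3" 0
  let troub := trouble_info.foldl (fun d t =>
    if pvTType t = 1 then d.modify "type1" 0 (· + 1)
    else if pvTType t = 2 then d.modify "type2" 0 (· + 1)
    else d.modify "type3" 0 (· + 1)) troub
  troub.items

-- ===== PORT B =====
def count_trouble_type_alt (trouble_info : List (List (String × Int))) : List (String × Int) :=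
  let types := trouble_info.map pvTType
  [("type1", (PySem.List.count types 1 : Int)),
   ("type2", (PySem.List.count types 2 : Int)),
   ("type3", (types.length : Int) - (PySem.List.count types 1 : Int) - (PySem.List.count types 2 : Int))]

-- ===== PRECONDITION & SPEC =====
-- Pre_ excludes exactly the inputs where some item lacks the 'trouble_type' key, on which A raises KeyError.
def Pre_count_trouble_type (trouble_info : List (List (String × Int))) : Prop :=
  ∀ t ∈ trouble_info, (PySem.Dict.mk t).contains "trouble_type" = true
instance (trouble_info : List (List (String × Int))) : Decidable (Pre_count_trouble_type trouble_info) := by unfold Pre_count_trouble_type; infer_instance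
def pvWitness_count_trouble_type : (List (List (String × Int))) := [[("trouble_type", 1)], [("trouble_type", 5)]]

def Spec_count_trouble_type (trouble_info : List (List (String × Int))) (out : List (String × Int)) : Prop := out = count_trouble_type_alt trouble_info
instance (trouble_info : List (List (String × Int))) (out : List (String × Int)) : Decidable (Spec_count_trouble_type trouble_info out) := by unfold Spec_count_trouble_type; infer_instance

-- ===== CLAIM =====
def Claim_equal_count_trouble_type : Prop := ∀ (trouble_info : List (List (String × Int))), Dom_count_trouble_type trouble_info → Pre_count_trouble_type trouble_info → Spec_count_trouble_type trouble_info (count_trouble_type trouble_info)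

-- ===== LEMMAS AND PROOFS =====

lemma modify1 (a b c : Int) :
    (PySem.Dict.mk [("type1", a), ("type2", b), ("type3", c)]).modify "type1" 0 (· + 1)
      = PySem.Dict.mk [("type1", a + 1), ("type2", b), ("type3", c)] := by
  simp [PySem.Dict.modify, PySem.Dict.insert, PySem.Dict.getD, PySem.Dict.get?, PySem.Dict.contains]

lemma modify2 (a b c : Int) :
    (PySem.Dict.mk [("type1", a), ("type2", b), ("type3", c)]).modify "type2" 0 (· + 1)
      = PySem.Dict.mk [("type1", a), ("type2", b + 1), ("type3", c)] := by
  simp [PySem.Dict.modify, PySem.Dict.insert, PySem.Dict.getD, PySem.Dict.get?, PySem.Dict.contains]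

lemma modify3 (a b c : Int) :
    (PySem.Dict.mk [("type1", a), ("type2", b), ("type3", c)]).modify "type3" 0 (· + 1)
      = PySem.Dict.mk [("type1", a), ("type2", b), ("type3", c + 1)] := by
  simp [PySem.Dict.modify, PySem.Dict.insert, PySem.Dict.getD, PySem.Dict.get?, PySem.Dict.contains]

-- A's loop over an accumulator dict with exactly the three keys, characterised by counts.
lemma A_fold (ti : List (List (String × Int))) (a b c : Int) :
    ti.foldl (fun d t =>
      if pvTType t = 1 then d.modify "type1" 0 (· + 1)
      else if pvTType t = 2 then d.modify "type2" 0 (· + 1)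
      else d.modify "type3" 0 (· + 1))
      (PySem.Dict.mk [("type1", a), ("type2", b), ("type3", c)]) =
    PySem.Dict.mk [("type1", a + ((ti.map pvTType).count 1 : Int)),
                   ("type2", b + ((ti.map pvTType).count 2 : Int)),
                   ("type3", c + ((ti.length : Int) - ((ti.map pvTType).count 1 : Int) - ((ti.map pvTType).count 2 : Int)))] := by
  induction ti generalizing a b c with
  | nil => simp
  | cons t ts ih =>
    simp only [List.foldl_cons, List.map_cons, List.length_cons, List.count_cons]
    by_cases h1 : pvTType t = 1
    · rw [if_pos h1, modify1, ih]
      simp [h1]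
      ring
    · by_cases h2 : pvTType t = 2
      · rw [if_neg h1, if_pos h2, modify2, ih]
        simp [h2]
        exact ⟨by ring, by ring⟩
      · rw [if_neg h1, if_neg h2, modify3, ih]
        simp [h1, h2]
        ring

-- ===== VERDICT =====
theorem count_trouble_type_spec : Claim_equal_count_trouble_type := by
  intro ti _ _
  unfold Spec_count_trouble_type count_trouble_type count_trouble_type_alt
  have hinit : ((PySem.Dict.empty.insert "type1" 0).insert "type2" (0 : Int)).insert "type3" 0
      = PySem.Dict.mk [("type1", 0), ("type2", 0), ("type3", 0)] := by decide
  simp only [hinit, A_fold, PySem.List.count_eq, List.length_map]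
  norm_num
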